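-- pv_equiv track=rewrite | github.com/LULLULALLA0525/Everyday_CodingTest | 햄버거 분배.py | solution
-- ===== SOURCE A (Python) =====
-- def solution(table, k):
--   result = 0
--   for i in range(len(table)):
--     if table[i] == "P":
--       if i < k:
--         start = 0
--       else:
--         start = i - k
--
--       if i + k >= len(table):
--         end = len(table) - 1
--       else:
--         end = i + k
--
--       for j in range(start, end + 1):
--         if table[j] == "H":
--           result += 1
--           table[j] = "X"
--           break
--
--   return result
-- ===== SOURCE B (Python) =====
-- def solution(table, k):
--     # Two-pointer over the precomputed H positions instead of rescanning a window per P.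
--     # Note: unlike A, this does not mutate `table`; return-value equivalence only.
--     hs = [i for i, c in enumerate(table) if c == "H"]
--     res = 0
--     j = 0
--     for i, c in enumerate(table):
--         if c == "P":
--             while j < len(hs) and hs[j] < i - k:
--                 j += 1
--             if j < len(hs) and hs[j] <= i + k:
--                 res += 1
--                 j += 1
--     return res
-- ===== Notes on version B (the rewrite author's own statement) =====
-- stated objective: alternative
-- what changed: Instead of rescanning the whole [i-k, i+k] window of the mutated table for every 'P' (marking used H cells with 'X' in place), B precomputes the list of 'H' positions once and matches each 'P' with a single monotone pointer into that list; B does not mutate the input list (return-value equivalence).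
import Mathlib
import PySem

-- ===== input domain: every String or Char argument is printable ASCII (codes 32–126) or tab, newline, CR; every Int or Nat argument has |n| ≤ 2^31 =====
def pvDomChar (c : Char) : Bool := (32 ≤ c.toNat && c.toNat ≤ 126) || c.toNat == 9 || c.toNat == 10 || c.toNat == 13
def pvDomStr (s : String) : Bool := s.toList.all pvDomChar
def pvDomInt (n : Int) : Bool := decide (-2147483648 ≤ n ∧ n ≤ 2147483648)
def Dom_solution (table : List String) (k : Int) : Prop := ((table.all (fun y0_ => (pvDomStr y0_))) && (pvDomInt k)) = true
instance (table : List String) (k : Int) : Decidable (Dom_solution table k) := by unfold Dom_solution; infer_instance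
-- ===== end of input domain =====

-- Alternative: B replaces A's per-'P' window rescan of the mutated table by a one-pass
-- two-pointer match against the precomputed list of 'H' positions. A mutates `table` in place
-- ('H' -> 'X'), B does not: the equivalence proved here is about the return value only.


-- ===== PORT A =====
-- inner 'for j in range(start, end+1): … break' loop, with the early break as a return
def solInner (t : List String) (js : List Int) (res : Int) : List String × Int :=
  match js with
  | [] => (t, res)
  | j :: rest =>
    if PySem.List.pyGet? t j == some "H" then (PySem.List.pySetD t j "X", res + 1)
    else solInner t rest res

-- outer 'for i in range(len(table))' loop; state = (current table, result)
def solOuter (k n : Int) (is : List Int) (st : List String × Int) : List String × Int :=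
  match is with
  | [] => st
  | i :: rest =>
    let st' :=
      if PySem.List.pyGet? st.1 i == some "P" then
        let start := if i < k then 0 else i - k
        let e := if i + k ≥ n then n - 1 else i + k
        solInner st.1 (PySem.List.pyRange start (e + 1) 1) st.2
      else st
    solOuter k n rest st'

def solution (table : List String) (k : Int) : Int :=
  (solOuter k (table.length : Int) (PySem.List.pyRange 0 (table.length : Int) 1) (table, 0)).2

-- ===== PORT B =====
-- 'while j < len(hs) and hs[j] < i - k: j += 1' — the advancing pointer is modelled by the
-- remaining suffix of hs
def skipLow (hs : List Int) (lo : Int) : List Int :=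
  match hs with
  | [] => []
  | h :: t => if h < lo then skipLow t lo else h :: t

-- 'for i, c in enumerate(table): …'
def altLoop (k : Int) (items : List (Int × String)) (hs : List Int) (res : Int) : Int :=
  match items with
  | [] => res
  | (i, c) :: rest =>
    if c == "P" then
      match skipLow hs (i - k) with
      | [] => altLoop k rest [] res
      | h :: hrest =>
        if h ≤ i + k then altLoop k rest hrest (res + 1) else altLoop k rest (h :: hrest) res
    else altLoop k rest hs res

def solution_alt (table : List String) (k : Int) : Int :=
  let hs := ((PySem.List.enumerate table 0).filter (fun p => p.2 == "H")).map (fun p => p.1)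
  altLoop k (PySem.List.enumerate table 0) hs 0

-- ===== PRECONDITION & SPEC =====
def Spec_solution (table : List String) (k : Int) (out : Int) : Prop := out = solution_alt table k
instance (table : List String) (k : Int) (out : Int) : Decidable (Spec_solution table k out) := by unfold Spec_solution; infer_instance

-- ===== CLAIM (what is proved, stated in full; the proofs are below) =====
def Claim_equal_solution : Prop := ∀ (table : List String) (k : Int), Dom_solution table k → Spec_solution table k (solution table k)

-- ===== LEMMAS AND PROOFS =====

-- indices (counted from `s`) of the cells of `l` holding the string `c`
def Fil (c : String) (l : List String) (s : Int) : List Int :=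
  ((PySem.List.enumerate l s).filter (fun p => p.2 == c)).map (fun p => p.1)

-- the 'P' indices of `t` from position `i` on
def pFrom (t : List String) (i : Nat) : List Int := Fil "P" (t.drop i) (i : Int)

-- the matching count both loops compute: per 'P' index, skip used/too-low H's, match if in range
def greedy (k : Int) : List Int → List Int → Int
  | [], _ => 0
  | p :: ps, hs =>
    match skipLow hs (p - k) with
    | [] => greedy k ps []
    | h :: rest => if h ≤ p + k then 1 + greedy k ps rest else greedy k ps (h :: rest)

lemma Fil_append (c : String) (a b : List String) (s : Int) :
    Fil c (a ++ b) s = Fil c a s ++ Fil c b (s + a.length) := by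
  simp [Fil, PySem.List.enumerate_append, List.filter_append]

lemma Fil_cons (c x : String) (xs : List String) (s : Int) :
    Fil c (x :: xs) s = if (x == c) = true then s :: Fil c xs (s+1) else Fil c xs (s+1) := by
  simp only [Fil, PySem.List.enumerate_cons, List.filter_cons]
  by_cases h : (x == c) = true <;> simp [h]

lemma mem_Fil {c : String} {l : List String} {s x : Int} :
    x ∈ Fil c l s ↔ ∃ (m : Nat) (_ : m < l.length), x = s + m ∧ (l[m] == c) = true := by
  
  simp only [Fil, List.mem_map, List.mem_filter, PySem.List.mem_enumerate_iff]
  constructor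
  · rintro ⟨p, ⟨⟨m, hmlt, rfl⟩, hc⟩, rfl⟩
    exact ⟨m, hmlt, rfl, by simpa using hc⟩
  · rintro ⟨m, hmlt, rfl, hc⟩
    exact ⟨(s + m, l[m]), ⟨⟨m, hmlt, rfl⟩, by simpa using hc⟩, rfl⟩

lemma Fil_sorted (c : String) (l : List String) (s : Int) : (Fil c l s).Pairwise (· < ·) := by
  
  exact List.pairwise_map.mpr ((PySem.List.pairwise_lt_enumerate l s).filter _)

lemma Fil_nonneg {c : String} {l : List String} {x : Int} (h : x ∈ Fil c l 0) :
    0 ≤ x ∧ x < (l.length : Int) := by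
  
  rcases mem_Fil.mp h with ⟨m, hmlt, rfl, -⟩
  constructor <;> omega

lemma Fil_split (c : String) (t : List String) (j : Nat) (hj : j < t.length) :
    Fil c t 0 = Fil c (t.take j) 0 ++
      ((if (t[j] == c) = true then [(j : Int)] else []) ++ Fil c (t.drop (j+1)) ((j : Int) + 1)) := by
  
  have ht : t = t.take j ++ t[j] :: t.drop (j+1) := by
    conv_lhs => rw [← List.take_append_drop j t]
    rw [List.drop_eq_getElem_cons hj]
  have hlen : ((t.take j).length : Int) = (j : Int) := by
    simp [List.length_take]; omega
  conv_lhs => rw [ht]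
  rw [Fil_append, Fil_cons, hlen]
  by_cases h : (t[j] == c) = true <;> simp [h]

lemma Fil_set (c : String) (t : List String) (j : Nat) (v : String) (hj : j < t.length)
    (h1 : (t[j] == c) = false) (h2 : (v == c) = false) (s : Int) :
    Fil c (t.set j v) s = Fil c t s := by
  
  have ht : t = t.take j ++ t[j] :: t.drop (j+1) := by
    conv_lhs => rw [← List.take_append_drop j t]
    rw [List.drop_eq_getElem_cons hj]
  rw [List.set_eq_take_cons_drop v hj, Fil_append, Fil_cons]
  conv_rhs => rw [ht]
  rw [Fil_append, Fil_cons, h1, h2]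

lemma pFrom_set (t : List String) (j : Nat) (hj : j < t.length) (hH : t[j] = "H") (i : Nat) :
    pFrom (t.set j "X") i = pFrom t i := by
  
  unfold pFrom
  rw [List.drop_set]
  split_ifs with hji
  · rfl
  · have hlt : j - i < (t.drop i).length := by simp; omega
    have hget : (t.drop i)[j - i]'hlt = t[j] := by
      rw [List.getElem_drop]
      congr 1
      omega
    exact Fil_set "P" (t.drop i) (j - i) "X" hlt (by rw [hget, hH]; rfl) rfl (i : Int)

lemma pFrom_step (t : List String) (i : Nat) (hi : i < t.length) :
    pFrom t i = if (t[i] == "P") = true then (i : Int) :: pFrom t (i+1) else pFrom t (i+1) := by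
  
  unfold pFrom
  rw [List.drop_eq_getElem_cons hi, Fil_cons]
  have : ((i : Int) + 1) = ((i + 1 : Nat) : Int) := by push_cast; ring
  rw [this]

lemma skipLow_head_ge {l : List Int} {s h : Int} {r : List Int} (hE : skipLow l s = h :: r) :
    s ≤ h := by
  
  induction l with
  | nil => simp [skipLow] at hE
  | cons x t ih =>
    by_cases hx : x < s
    · exact ih (by simpa [skipLow, hx] using hE)
    · simp only [skipLow, if_neg hx] at hE
      cases hE; omega

lemma skipLow_all_ge {l : List Int} {s : Int} (h : ∀ x ∈ l, s ≤ x) : skipLow l s = l := by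
  
  cases l with
  | nil => rfl
  | cons x t =>
    have hx : ¬ x < s := by have := h x (by simp); omega
    simp [skipLow, hx]

lemma skipLow_append {pre l : List Int} {s : Int} (h : ∀ x ∈ pre, x < s) :
    skipLow (pre ++ l) s = skipLow l s := by
  
  induction pre with
  | nil => simp
  | cons x t ih => simp only [List.cons_append, skipLow, if_pos (h x (by simp))]
                   exact ih (fun y hy => h y (by simp [hy]))

lemma skipLow_decomp (l : List Int) (s : Int) :
    ∃ p2, l = p2 ++ skipLow l s ∧ ∀ x ∈ p2, x < s := by
  
  induction l with
  | nil => exact ⟨[], by simp [skipLow]⟩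
  | cons x t ih =>
    by_cases hx : x < s
    · rcases ih with ⟨p2, hp2, hlt⟩
      refine ⟨x :: p2, ?_, ?_⟩
      · simp only [skipLow, if_pos hx, List.cons_append]; rw [← hp2]
      · intro y hy
        rcases List.mem_cons.mp hy with rfl | hy
        · exact hx
        · exact hlt _ hy
    · exact ⟨[], by simp [skipLow, if_neg hx]⟩

lemma skipLow_sublist (l : List Int) (s : Int) : ∀ x ∈ skipLow l s, x ∈ l := by
  
  rcases skipLow_decomp l s with ⟨p2, hp2, -⟩
  intro x hx
  rw [hp2]; exact List.mem_append_right _ hx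

lemma skipLow_head_of_mem {l : List Int} {s : Int} (hs : l.Pairwise (· < ·)) (hm : s ∈ l) :
    ∃ r, skipLow l s = s :: r := by
  
  induction l with
  | nil => simp at hm
  | cons x t ih =>
    rcases List.mem_cons.mp hm with rfl | hmt
    · exact ⟨t, by simp [skipLow]⟩
    · by_cases hx : x < s
      · rcases ih hs.of_cons hmt with ⟨r, hr⟩
        exact ⟨r, by simpa [skipLow, hx] using hr⟩
      · exact absurd (List.rel_of_pairwise_cons hs hmt) hx

lemma skipLow_succ {l : List Int} {s : Int} (h : s ∉ l) : skipLow l s = skipLow l (s+1) := by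
  
  induction l with
  | nil => rfl
  | cons x t ih =>
    have hxs : x ≠ s := fun hh => h (by simp [hh])
    by_cases hx : x < s
    · simp only [skipLow, if_pos hx, if_pos (by omega : x < s + 1)]
      exact ih (fun hh => h (by simp [hh]))
    · simp only [skipLow, if_neg hx, if_neg (by omega : ¬ x < s + 1)]

-- unique split of a strictly increasing list at an element
lemma sorted_split_unique {h : Int} : ∀ {a b c d : List Int},
    (a ++ h :: b).Pairwise (· < ·) → a ++ h :: b = c ++ h :: d → a = c ∧ b = d := by
  
  intro a
  induction a with
  | nil =>
    intro b c d hp he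
    cases c with
    | nil => simpa using he
    | cons z c' =>
      exfalso
      simp only [List.nil_append, List.cons_append, List.cons.injEq] at he
      rcases he with ⟨rfl, rfl⟩
      have := List.rel_of_pairwise_cons hp (by simp : h ∈ c' ++ h :: d)
      omega
  | cons y a' ih =>
    intro b c d hp he
    cases c with
    | nil =>
      exfalso
      simp only [List.cons_append, List.nil_append, List.cons.injEq] at he
      obtain ⟨hyh, -⟩ := he
      have := List.rel_of_pairwise_cons hp (by simp : h ∈ a' ++ h :: b)
      omega
    | cons z c' =>
      simp only [List.cons_append, List.cons.injEq] at he
      rcases he with ⟨rfl, he⟩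
      rcases ih hp.of_cons he with ⟨rfl, rfl⟩
      exact ⟨rfl, rfl⟩

lemma mem_HIdx_iff_pyGet (t : List String) (x : Int) (hx : 0 ≤ x) :
    x ∈ Fil "H" t 0 ↔ (PySem.List.pyGet? t x == some "H") = true := by
  
  rw [PySem.List.pyGet?_of_nonneg t hx, mem_Fil]
  constructor
  · rintro ⟨m, hm, rfl, hc⟩
    have : ((0 : Int) + m).toNat = m := by omega
    rw [this]
    simp [List.getElem?_eq_getElem hm, hc]
  · intro hg
    by_cases hlt : x.toNat < t.length
    · refine ⟨x.toNat, hlt, by omega, ?_⟩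
      have := List.getElem?_eq_getElem hlt
      rw [this] at hg
      simpa using hg
    · rw [List.getElem?_eq_none (by omega)] at hg
      simp at hg

-- the inner scan finds exactly the first H position ≥ s, if it is ≤ e
lemma scan_spec (t : List String) : ∀ (m : Nat) (s e : Int) (res : Int), 0 ≤ s →
    m = (e + 1 - s).toNat →
    solInner t (PySem.List.pyRange s (e+1) 1) res =
      (match skipLow (Fil "H" t 0) s with
       | [] => (t, res)
       | h :: _ => if h ≤ e then (PySem.List.pySetD t h "X", res + 1) else (t, res)) := by
  
  intro m
  induction m with
  | zero =>
    intro s e res hs0 hm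
    rw [PySem.List.pyRange_one_eq_nil (by omega)]
    cases hE : skipLow (Fil "H" t 0) s with
    | nil => rfl
    | cons h r =>
      have hge := skipLow_head_ge hE
      dsimp only
      rw [if_neg (by omega)]
      rfl
  | succ m ih =>
    intro s e res hs0 hm
    rw [PySem.List.pyRange_one_cons (by omega : s < e + 1)]
    by_cases hH : (PySem.List.pyGet? t s == some "H") = true
    · simp only [solInner, if_pos hH]
      have hmem : s ∈ Fil "H" t 0 := (mem_HIdx_iff_pyGet t s hs0).mpr hH
      rcases skipLow_head_of_mem (Fil_sorted "H" t 0) hmem with ⟨r, hr⟩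
      rw [hr]
      dsimp only
      rw [if_pos (by omega : s ≤ e)]
    · simp only [solInner, if_neg hH]
      have hnm : s ∉ Fil "H" t 0 := fun hc => hH ((mem_HIdx_iff_pyGet t s hs0).mp hc)
      rw [ih (s+1) e res (by omega) (by omega)]
      rw [skipLow_succ hnm]

lemma Amain (k : Int) : ∀ (m : Nat) (t : List String) (i : Nat), i + m = t.length →
    ∀ (pre hs : List Int) (res : Int), Fil "H" t 0 = pre ++ hs →
    (∀ x ∈ pre, x < (i : Int) - k) →
    (solOuter k (t.length : Int) (PySem.List.pyRange (i : Int) (t.length : Int) 1) (t, res)).2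
      = res + greedy k (pFrom t i) hs := by
  
  intro m
  induction m with
  | zero =>
    intro t i him pre hs res hsplit hpre
    rw [PySem.List.pyRange_one_eq_nil (by omega)]
    have hd : t.drop i = [] := List.drop_eq_nil_of_le (by omega)
    simp [solOuter, pFrom, hd, Fil, greedy]
  | succ m ih =>
    intro t i him pre hs res hsplit hpre
    have hi : i < t.length := by omega
    have hmemhs : ∀ x ∈ hs, 0 ≤ x ∧ x < (t.length : Int) := fun x hx =>
      Fil_nonneg (by rw [hsplit]; exact List.mem_append_right _ hx)
    rw [PySem.List.pyRange_one_cons (by exact_mod_cast hi)]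
    simp only [solOuter]
    have hget : PySem.List.pyGet? t (i : Int) = some t[i] := by
      rw [PySem.List.pyGet?_natCast]; exact List.getElem?_eq_getElem hi
    have hcast : ((i : Int) + 1) = ((i + 1 : Nat) : Int) := by push_cast; ring
    by_cases hP : (t[i] == "P") = true
    · -- current cell is a 'P'
      have hguard : (PySem.List.pyGet? t (↑i) == some "P") = true := by
        rw [hget]; simpa using hP
      rw [hguard]
      simp only [if_true]
      -- the window bounds A computes
      have hs0 : 0 ≤ (if (i : Int) < k then 0 else (i : Int) - k) := by
        split_ifs with h <;> omega
      rw [scan_spec t _ _ _ _ hs0 rfl]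
      -- the scan looks exactly at the H's ≥ i - k that B has not yet consumed
      have hskip : skipLow (Fil "H" t 0) (if (i : Int) < k then 0 else (i : Int) - k)
          = skipLow hs ((i : Int) - k) := by
        by_cases hik : (i : Int) < k
        · have hprenil : pre = [] := by
            rcases pre with - | ⟨x, p⟩
            · rfl
            · exfalso
              have h0 : 0 ≤ x := (Fil_nonneg (by rw [hsplit]; simp)).1
              have := hpre x (by simp)
              omega
          rw [if_pos hik, hsplit, hprenil, List.nil_append,
            skipLow_all_ge (fun x hx => (hmemhs x hx).1),
            skipLow_all_ge (fun x hx => by have := (hmemhs x hx).1; omega)]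
        · rw [if_neg hik, hsplit]
          exact skipLow_append hpre
      rw [hskip]
      rcases skipLow_decomp hs ((i : Int) - k) with ⟨p2, hp2, hp2lt⟩
      rw [pFrom_step t i hi, if_pos hP]
      cases hsk : skipLow hs ((i : Int) - k) with
      | nil =>
        -- no available H in range: state unchanged
        rw [hcast]
        rw [ih t (i+1) (by omega) (pre ++ hs) [] res
          (by rw [hsplit, List.append_nil]) ?hb]
        case hb =>
          intro x hx
          rcases List.mem_append.mp hx with hx | hx
          · have := hpre x hx; omega
          · rw [hp2, hsk, List.append_nil] at hx
            have := hp2lt x hx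
            omega
        simp only [greedy, hsk]
      | cons h rest =>
        have hhm : h ∈ hs := skipLow_sublist hs _ h (by rw [hsk]; simp)
        have hhb := hmemhs h hhm
        have hiff : (h ≤ (if (i : Int) + k ≥ (t.length : Int) then (t.length : Int) - 1 else (i : Int) + k)) ↔ h ≤ (i : Int) + k := by
          split_ifs with hbig
          · constructor <;> intro <;> omega
          · exact Iff.rfl
        simp only [greedy, hsk]
        by_cases hle : h ≤ (i : Int) + k
        · -- match: A crosses out the H at h, B consumes it
          rw [if_pos (hiff.mpr hle), if_pos hle]
          have hj : h.toNat < t.length := by omega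
          have hjH : (t[h.toNat] == "H") = true := by
            have hhF : h ∈ Fil "H" t 0 := by rw [hsplit]; exact List.mem_append_right _ hhm
            rcases mem_Fil.mp hhF with ⟨mm, hmm, hxe, hc⟩
            have hmmh : mm = h.toNat := by omega
            subst hmmh
            exact hc
          have hsplitA : Fil "H" t 0
              = Fil "H" (t.take h.toNat) 0 ++ h :: Fil "H" (t.drop (h.toNat+1)) ((h.toNat : Int) + 1) := by
            rw [Fil_split "H" t h.toNat hj]
            rw [if_pos hjH]
            simp only [List.singleton_append]
            congr 2
            omega
          have hsplitB : Fil "H" t 0 = (pre ++ p2) ++ h :: rest := by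
            rw [hsplit, hp2, hsk]
            simp [List.append_assoc]
          have huniq := sorted_split_unique (a := Fil "H" (t.take h.toNat) 0)
            (b := Fil "H" (t.drop (h.toNat+1)) ((h.toNat : Int) + 1)) (c := pre ++ p2) (d := rest)
            (by rw [← hsplitA]; exact Fil_sorted "H" t 0) (by rw [← hsplitA, hsplitB])
          have hsetsplit : Fil "H" (t.set h.toNat "X") 0 = (pre ++ p2) ++ rest := by
            rw [Fil_split "H" (t.set h.toNat "X") h.toNat (by simpa using hj)]
            rw [if_neg (by simp [List.getElem_set_self])]
            rw [List.take_set, List.set_eq_of_length_le (by simp [List.length_take])]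
            rw [List.drop_set, if_pos (by omega)]
            rw [huniq.1, huniq.2]
            simp
          have hpset : PySem.List.pySetD t h "X" = t.set h.toNat "X" :=
            PySem.List.pySetD_of_nonneg t "X" (by omega)
          rw [hpset, hcast]
          have hlen' : ((t.set h.toNat "X").length : Int) = (t.length : Int) := by simp
          have := ih (t.set h.toNat "X") (i+1) (by simp; omega) (pre ++ p2) rest (res + 1)
            hsetsplit ?hb2
          case hb2 =>
            intro x hx
            rcases List.mem_append.mp hx with hx | hx
            · have := hpre x hx; omega
            · have := hp2lt x hx; omega
          rw [hlen'] at this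
          rw [this]
          rw [pFrom_set t h.toNat hj (by exact eq_of_beq hjH) (i+1)]
          ring
        · -- nearest available H is beyond i + k: nobody matches
          rw [if_neg (fun hc => hle (hiff.mp hc)), if_neg hle]
          rw [hcast]
          rw [ih t (i+1) (by omega) (pre ++ p2) (h :: rest) res
            (by rw [hsplit, hp2, hsk]; simp [List.append_assoc]) ?hb3]
          case hb3 =>
            intro x hx
            rcases List.mem_append.mp hx with hx | hx
            · have := hpre x hx; omega
            · have := hp2lt x hx; omega
    · -- not a 'P': nothing happens at i
      have hguard : (PySem.List.pyGet? t (↑i) == some "P") = false := by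
        rw [hget]; simpa using hP
      rw [hguard]
      simp only [Bool.false_eq_true, if_false]
      rw [hcast]
      rw [ih t (i+1) (by omega) pre hs res hsplit
        (fun x hx => by have := hpre x hx; omega)]
      rw [pFrom_step t i hi, if_neg hP]

lemma altLoop_eq (k : Int) : ∀ (items : List (Int × String)) (hs : List Int) (res : Int),
    altLoop k items hs res
      = res + greedy k ((items.filter (fun p => p.2 == "P")).map (fun p => p.1)) hs := by
  
  intro items
  induction items with
  | nil => simp [altLoop, greedy]
  | cons p rest ih =>
    intro hs res
    obtain ⟨i, c⟩ := p
    by_cases hc : (c == "P") = true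
    · cases hE : skipLow hs (i - k) with
      | nil => simp [altLoop, greedy, hc, hE, ih]
      | cons h hrest =>
        by_cases hle : h ≤ i + k
        · simp only [altLoop, hc, if_true, hE, if_pos hle, ih, List.filter_cons, List.map_cons,
            greedy]
          ring
        · simp [altLoop, greedy, hc, hE, hle, ih]
    · simp [altLoop, hc, ih]

-- ===== VERDICT (by name: the statement is the Claim_ definition above) =====
theorem solution_spec : Claim_equal_solution := by
  intro table k _
  unfold Spec_solution solution solution_alt
  rw [altLoop_eq]
  have h0 : (PySem.List.pyRange ((0:Nat) : Int) (table.length : Int) 1) = PySem.List.pyRange 0 (table.length : Int) 1 := by norm_num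
  have := Amain k table.length table 0 (by omega) [] (Fil "H" table 0) 0 (by simp) (by simp)
  rw [h0] at this
  rw [this]
  have : ((PySem.List.enumerate table 0).filter (fun p => p.2 == "P")).map (fun p => p.1) = pFrom table 0 := by
    simp [pFrom, Fil]
  rw [this]
  rfl
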